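-- pv_equiv track=rewrite | github.com/srp33/F4 | Builder.py | __generate_chunk_ranges
-- ===== SOURCE A (Python) =====
-- def __generate_chunk_ranges(num_cols, num_cols_per_chunk):
--     if num_cols_per_chunk:
--         last_end_index = 0
--
--         while last_end_index != num_cols:
--             last_start_index = last_end_index
--             last_end_index = min([last_start_index + num_cols_per_chunk, num_cols])
--             yield [last_start_index, last_end_index]
--     else:
--         yield [0, num_cols]
-- ===== SOURCE B (Python) =====
-- def __generate_chunk_ranges(num_cols, num_cols_per_chunk):
--     if num_cols_per_chunk:
--         bounds = list(range(0, num_cols, num_cols_per_chunk)) + [num_cols]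
--         for start, end in zip(bounds, bounds[1:]):
--             yield [start, end]
--     else:
--         yield [0, num_cols]
-- ===== Notes on version B (the rewrite author's own statement) =====
-- stated objective: idiomatic
-- what changed: B precomputes the chunk boundary list range(0, num_cols, stride) + [num_cols] and pairs adjacent boundaries with zip, instead of A's while loop that threads a running last_end_index and recomputes min(start + stride, num_cols) each iteration.
-- intended difference: For negative num_cols with a positive chunk stride A returns the single backwards chunk [[0, num_cols]], an artefact of its min/while logic, while B returns [] - no columns means no chunks, the intended value. — e.g. on __generate_chunk_ranges(-3, 2): A returns [[0, -3]], B returns []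
-- outside the precondition, e.g. on __generate_chunk_ranges(-4, -2): A returns [[0, -4]], B returns [[0, -2], [-2, -4]]; on __generate_chunk_ranges(5, -2): A does not finish within the time limit, B returns []
import Mathlib
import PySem

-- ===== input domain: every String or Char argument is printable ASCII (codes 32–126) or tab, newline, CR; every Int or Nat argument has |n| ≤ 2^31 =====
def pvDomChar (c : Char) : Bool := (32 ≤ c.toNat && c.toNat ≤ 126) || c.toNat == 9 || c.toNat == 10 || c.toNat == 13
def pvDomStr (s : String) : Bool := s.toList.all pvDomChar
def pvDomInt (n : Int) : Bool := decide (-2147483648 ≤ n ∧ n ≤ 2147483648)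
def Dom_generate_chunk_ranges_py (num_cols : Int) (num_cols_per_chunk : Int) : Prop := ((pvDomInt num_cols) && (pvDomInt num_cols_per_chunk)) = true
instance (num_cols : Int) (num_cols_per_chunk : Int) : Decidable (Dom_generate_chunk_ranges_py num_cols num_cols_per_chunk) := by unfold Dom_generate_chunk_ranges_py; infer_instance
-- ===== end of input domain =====

-- B replaces A's while loop (running last_end_index + min each iteration) by a boundary list
-- range(0, num_cols, stride) + [num_cols] zipped with its tail (objective: idiomatic; same cost).

-- ===== PORT A =====
-- A's while loop; the fuel (num_cols.toNat + 1) only makes the recursion total and is never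
-- exhausted on Pre_ inputs (proved in pyA_loop_eq / the verdict below): the loop runs at most
-- num_cols iterations when the stride is positive and at most one otherwise.
def pyA_loop : Nat → Int → Int → Int → List (List Int)
  | 0, _, _, _ => []
  | fuel + 1, num_cols, num_cols_per_chunk, last_end_index =>
      if last_end_index ≠ num_cols then
        let last_start_index := last_end_index
        let last_end_index' := min (last_start_index + num_cols_per_chunk) num_cols
        [last_start_index, last_end_index'] :: pyA_loop fuel num_cols num_cols_per_chunk last_end_index'
      else []

def generate_chunk_ranges_py (num_cols : Int) (num_cols_per_chunk : Int) : List (List Int) :=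
  if num_cols_per_chunk ≠ 0 then
    pyA_loop (num_cols.toNat + 1) num_cols num_cols_per_chunk 0
  else
    [[0, num_cols]]

-- ===== PORT B =====
-- bounds[1:] on a list with nonnegative start index is List.tail (PySem.List.slice_from_one).
def generate_chunk_ranges_py_alt (num_cols : Int) (num_cols_per_chunk : Int) : List (List Int) :=
  if num_cols_per_chunk ≠ 0 then
    let bounds := PySem.List.pyRange 0 num_cols num_cols_per_chunk ++ [num_cols]
    (bounds.zip bounds.tail).map (fun p => [p.1, p.2])
  else
    [[0, num_cols]]

-- ===== PRECONDITION & SPEC =====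
-- Pre_ excludes a negative stride with nonzero num_cols: there A loops forever whenever
-- num_cols > num_cols_per_chunk, and in the remaining corner (num_cols ≤ stride < 0) chunking
-- by a negative stride is unspecified and A's single chunk and B's descending chunks are both
-- defensible readings.
def Pre_generate_chunk_ranges_py (num_cols : Int) (num_cols_per_chunk : Int) : Prop :=
  0 ≤ num_cols_per_chunk ∨ num_cols = 0
instance (num_cols : Int) (num_cols_per_chunk : Int) : Decidable (Pre_generate_chunk_ranges_py num_cols num_cols_per_chunk) := by unfold Pre_generate_chunk_ranges_py; infer_instance

def pvWitness_generate_chunk_ranges_py : Int × Int := (7, 3)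

-- For negative num_cols with a positive chunk stride A returns the single backwards chunk
-- [[0, num_cols]], an artefact of its min/while logic, while B returns [] — no columns means
-- no chunks, the intended value.
def D_generate_chunk_ranges_py (num_cols : Int) (num_cols_per_chunk : Int) : Prop :=
  num_cols < 0 ∧ 0 < num_cols_per_chunk
instance (num_cols : Int) (num_cols_per_chunk : Int) : Decidable (D_generate_chunk_ranges_py num_cols num_cols_per_chunk) := by unfold D_generate_chunk_ranges_py; infer_instance

def Spec_generate_chunk_ranges_py (num_cols : Int) (num_cols_per_chunk : Int) (out : List (List Int)) : Prop := ¬ D_generate_chunk_ranges_py num_cols num_cols_per_chunk → out = generate_chunk_ranges_py_alt num_cols num_cols_per_chunk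
instance (num_cols : Int) (num_cols_per_chunk : Int) (out : List (List Int)) : Decidable (Spec_generate_chunk_ranges_py num_cols num_cols_per_chunk out) := by unfold Spec_generate_chunk_ranges_py; infer_instance

def pvDiffWitness_generate_chunk_ranges_py : Int × Int := (-3, 2)
def pvDiffWitnessOut_generate_chunk_ranges_py : (List (List Int)) × (List (List Int)) := ([[0, -3]], [])

-- ===== CLAIM (what is proved, stated in full; the proofs are below) =====
def Claim_unchanged_generate_chunk_ranges_py : Prop := ∀ (num_cols : Int) (num_cols_per_chunk : Int), Dom_generate_chunk_ranges_py num_cols num_cols_per_chunk → Pre_generate_chunk_ranges_py num_cols num_cols_per_chunk → Spec_generate_chunk_ranges_py num_cols num_cols_per_chunk (generate_chunk_ranges_py num_cols num_cols_per_chunk)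
def Claim_changed_generate_chunk_ranges_py : Prop := Dom_generate_chunk_ranges_py (pvDiffWitness_generate_chunk_ranges_py.1) (pvDiffWitness_generate_chunk_ranges_py.2) ∧ Pre_generate_chunk_ranges_py (pvDiffWitness_generate_chunk_ranges_py.1) (pvDiffWitness_generate_chunk_ranges_py.2) ∧ D_generate_chunk_ranges_py (pvDiffWitness_generate_chunk_ranges_py.1) (pvDiffWitness_generate_chunk_ranges_py.2) ∧ generate_chunk_ranges_py (pvDiffWitness_generate_chunk_ranges_py.1) (pvDiffWitness_generate_chunk_ranges_py.2) = pvDiffWitnessOut_generate_chunk_ranges_py.1 ∧ generate_chunk_ranges_py_alt (pvDiffWitness_generate_chunk_ranges_py.1) (pvDiffWitness_generate_chunk_ranges_py.2) = pvDiffWitnessOut_generate_chunk_ranges_py.2 ∧ pvDiffWitnessOut_generate_chunk_ranges_py.1 ≠ pvDiffWitnessOut_generate_chunk_ranges_py.2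
def Claim_exact_generate_chunk_ranges_py : Prop := ∀ (num_cols : Int) (num_cols_per_chunk : Int), Dom_generate_chunk_ranges_py num_cols num_cols_per_chunk → Pre_generate_chunk_ranges_py num_cols num_cols_per_chunk → D_generate_chunk_ranges_py num_cols num_cols_per_chunk → generate_chunk_ranges_py num_cols num_cols_per_chunk ≠ generate_chunk_ranges_py_alt num_cols num_cols_per_chunk

-- ===== LEMMAS AND PROOFS =====

lemma pyRange_nil_of_pos {a b s : Int} (hs : 0 < s) (h : b ≤ a) :
    PySem.List.pyRange a b s = [] := by
  rw [PySem.List.pyRange_of_pos a b hs]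
  simp [show ¬ a < b by omega]

lemma pyRange_cons_of_pos {a b s : Int} (hs : 0 < s) (h : a < b) :
    PySem.List.pyRange a b s = a :: PySem.List.pyRange (a + s) b s := by
  rw [PySem.List.pyRange_of_pos a b hs, PySem.List.pyRange_of_pos (a + s) b hs]
  have hdiv : (b - a + s - 1) / s = (b - a - 1) / s + 1 := by
    rw [show b - a + s - 1 = (b - a - 1) + 1 * s by ring,
      Int.add_mul_ediv_right _ _ (ne_of_gt hs)]
  by_cases h2 : a + s < b
  · have he : b - (a + s) + s - 1 = b - a - 1 := by ring
    have hnn : 0 ≤ (b - a - 1) / s := Int.ediv_nonneg (by omega) hs.le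
    simp only [if_pos h, if_pos h2, he, hdiv]
    rw [show ((b - a - 1) / s + 1).toNat = ((b - a - 1) / s).toNat + 1 by omega]
    rw [List.range_succ_eq_map, List.map_cons, List.map_map]
    refine congrArg₂ List.cons (by norm_num) ?_
    refine List.map_congr_left fun k _ => ?_
    simp only [Function.comp_apply]
    push_cast
    ring
  · have hz : (b - a - 1) / s = 0 := Int.ediv_eq_zero_of_lt (by omega) (by omega)
    simp only [if_pos h, if_neg h2, hdiv, hz]
    norm_num

-- the boundary list of B, starting at an arbitrary chunk start
def pvBounds (num_cols num_cols_per_chunk s : Int) : List Int :=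
  PySem.List.pyRange s num_cols num_cols_per_chunk ++ [num_cols]

lemma pyA_loop_eq {ch : Int} (hch : 0 < ch) :
    ∀ (fuel : Nat) (nc s : Int), s ≤ nc → nc - s ≤ (fuel : Int) * ch →
      pyA_loop fuel nc ch s =
        ((pvBounds nc ch s).zip (pvBounds nc ch s).tail).map (fun p => [p.1, p.2]) := by
  intro fuel
  induction fuel with
  | zero =>
    intro nc s h1 h2
    have hs : s = nc := by omega
    subst hs
    simp [pyA_loop, pvBounds, pyRange_nil_of_pos hch le_rfl]
  | succ f ih =>
    intro nc s h1 h2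
    by_cases hsn : s = nc
    · subst hsn
      simp [pyA_loop, pvBounds, pyRange_nil_of_pos hch le_rfl]
    · have hslt : s < nc := lt_of_le_of_ne h1 hsn
      rw [show pvBounds nc ch s = s :: pvBounds nc ch (s + ch) from by
        simp [pvBounds, pyRange_cons_of_pos hch hslt]]
      by_cases h2' : s + ch < nc
      · have hmin : min (s + ch) nc = s + ch := min_eq_left h2'.le
        have hrec := ih nc (s + ch) h2'.le (by push_cast at h2 ⊢; nlinarith)
        rw [show pvBounds nc ch (s + ch) = (s + ch) :: pvBounds nc ch (s + ch + ch) from by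
          simp [pvBounds, pyRange_cons_of_pos hch h2']] at hrec ⊢
        simp only [pyA_loop, if_pos hsn, hmin, List.tail_cons, List.zip_cons_cons,
          List.map_cons, hrec]
      · have hmin : min (s + ch) nc = nc := min_eq_right (by omega)
        have hf0 : (0 : Int) ≤ (f : Int) * ch := by positivity
        have hrec := ih nc nc le_rfl (by omega)
        rw [show pvBounds nc ch (s + ch) = [nc] from by
          simp [pvBounds, pyRange_nil_of_pos hch (show nc ≤ s + ch by omega)]]
        simp only [pyA_loop, if_pos hsn, hmin, List.tail_cons, List.zip_cons_cons,
          List.map_cons]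
        rw [hrec]
        simp [pvBounds, pyRange_nil_of_pos hch (le_refl nc)]

-- ===== VERDICT (by name: the statement is the Claim_ definition above) =====
theorem generate_chunk_ranges_py_spec : Claim_unchanged_generate_chunk_ranges_py := by
  intro nc ch _ hpre hnd
  unfold D_generate_chunk_ranges_py at hnd
  by_cases hch0 : ch = 0
  · subst hch0
    simp [generate_chunk_ranges_py, generate_chunk_ranges_py_alt]
  · rcases lt_or_gt_of_ne hch0 with hneg | hpos
    · -- negative stride: Pre_ forces nc = 0, both sides are []
      have hnc : nc = 0 := by
        rcases hpre with h | h
        · omega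
        · exact h
      subst hnc
      simp only [generate_chunk_ranges_py, generate_chunk_ranges_py_alt, if_pos hch0]
      have hr : PySem.List.pyRange 0 0 ch = [] := by
        simp [PySem.List.pyRange]
      simp [hr, pyA_loop]
    · -- positive stride: ¬D_ gives 0 ≤ nc, use the loop lemma
      have hnc : 0 ≤ nc := by
        by_contra hlt
        exact hnd ⟨by omega, hpos⟩
      simp only [generate_chunk_ranges_py, generate_chunk_ranges_py_alt, if_pos hch0]
      have hfuel : nc - 0 ≤ ((nc.toNat + 1 : Nat) : Int) * ch := by
        have h1 : ((nc.toNat : Nat) : Int) = nc := Int.toNat_of_nonneg hnc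
        push_cast
        nlinarith
      rw [pyA_loop_eq hpos (nc.toNat + 1) nc 0 hnc hfuel]
      rfl

theorem generate_chunk_ranges_py_changed : Claim_changed_generate_chunk_ranges_py := by
  unfold Claim_changed_generate_chunk_ranges_py; decide

theorem generate_chunk_ranges_py_tight : Claim_exact_generate_chunk_ranges_py := by
  intro nc ch _ _ hd
  obtain ⟨hnc, hch⟩ := hd
  have hch0 : ch ≠ 0 := by omega
  simp only [generate_chunk_ranges_py, generate_chunk_ranges_py_alt, if_pos hch0]
  have hfuel : nc.toNat = 0 := by omega
  rw [hfuel]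
  have hr : PySem.List.pyRange 0 nc ch = [] := pyRange_nil_of_pos hch (by omega)
  simp [hr, pyA_loop, show (0:Int) ≠ nc by omega]
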